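-- pv_equiv track=rewrite | github.com/andradmarcel/trilha-python-dio | 01 - Estrutura de dados/06 - Desafio de codigo/sistema_atendimento_medico.py | prioridade_paciente
-- ===== SOURCE A (Python) =====
-- def prioridade_paciente(lista_pacientes):
--     # Suas variáveis para os grupos de triagem
--     urgente = []
--     idosos = []
--     normal = []
--
--     # 1. FAZENDO A TRIAGEM SIMPLES
--     # Este laço separa os pacientes nos três grupos corretos.
--     for paciente in lista_pacientes:
--         if paciente[2] == "urgente":
--             urgente.append(paciente)
--         elif paciente[1] >= 60:
--             idosos.append(paciente)
--         else:
--             normal.append(paciente)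
--
--     # 2. A CORREÇÃO PRINCIPAL: A REGRA DE DESEMPATE
--     #    Agora que temos todos os pacientes urgentes, ordenamos essa lista específica.
--     #    - key=lambda p: p[1] diz para usar a idade (índice 1) como critério.
--     #    - reverse=True ordena do maior para o menor (mais velho primeiro).
--     urgente.sort(key=lambda p: p[1], reverse=True)
--
--     # Agora o resto do seu código já funciona perfeitamente!
--     fila_final = urgente + idosos + normal
--     nomes_ordenados = [paciente[0] for paciente in fila_final]
--
--     return nomes_ordenados
-- ===== SOURCE B (Python) =====
-- def prioridade_paciente(lista_pacientes):
--     # One stable sort: rank 0 = urgente (oldest first via -idade), 1 = idosos, 2 = demais;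
--     # constant secondary keys let stability keep input order inside ranks 1 and 2.
--     def chave(p):
--         if p[2] == "urgente":
--             return (0, -p[1])
--         elif p[1] >= 60:
--             return (1, 0)
--         return (2, 0)
--     return [p[0] for p in sorted(lista_pacientes, key=chave)]
-- ===== Notes on version B (the rewrite author's own statement) =====
-- stated objective: simpler
-- what changed: Replaces the three-bucket triage loop, subset sort and concatenation with a single stable sorted() over the whole list keyed by (rank, -age-for-urgent), relying on sort stability to preserve input order in the non-urgent groups.
import Mathlib
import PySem

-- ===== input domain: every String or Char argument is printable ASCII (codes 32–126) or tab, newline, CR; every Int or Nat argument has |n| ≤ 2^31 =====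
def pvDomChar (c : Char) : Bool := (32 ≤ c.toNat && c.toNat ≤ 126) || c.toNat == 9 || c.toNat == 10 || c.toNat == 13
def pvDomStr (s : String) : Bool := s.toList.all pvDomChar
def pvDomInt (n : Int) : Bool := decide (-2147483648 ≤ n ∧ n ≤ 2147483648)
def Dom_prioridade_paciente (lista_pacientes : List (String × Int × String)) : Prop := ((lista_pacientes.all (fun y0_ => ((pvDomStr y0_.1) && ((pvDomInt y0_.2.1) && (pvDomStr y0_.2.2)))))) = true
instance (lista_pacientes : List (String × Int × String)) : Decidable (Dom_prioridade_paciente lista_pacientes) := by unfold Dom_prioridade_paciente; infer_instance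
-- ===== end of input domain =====

-- B replaces A's three-bucket triage + subset sort + concatenation by ONE stable sort of the whole
-- list keyed by (rank, -age-for-urgent); objective: simpler (same O(n log n) cost).


-- ===== PORT A =====
def prioridade_paciente (lista_pacientes : List (String × Int × String)) : List String :=
  -- triage loop: three accumulators (urgente, idosos, normal)
  let t := lista_pacientes.foldl
    (fun (acc : List (String × Int × String) × List (String × Int × String) × List (String × Int × String)) paciente =>
      if paciente.2.2 = "urgente" then (acc.1 ++ [paciente], acc.2.1, acc.2.2)
      else if paciente.2.1 ≥ 60 then (acc.1, acc.2.1 ++ [paciente], acc.2.2)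
      else (acc.1, acc.2.1, acc.2.2 ++ [paciente])) ([], [], [])
  -- urgente.sort(key=lambda p: p[1], reverse=True)
  let urgente := PySem.List.sorted t.1 (fun p => p.2.1) true
  let fila_final := urgente ++ t.2.1 ++ t.2.2
  fila_final.map (fun paciente => paciente.1)

-- ===== PORT B =====
-- chave(p) = (0, -p[1]) if urgent, (1, 0) if age >= 60, (2, 0) otherwise
def pvChave1 (p : String × Int × String) : Int :=
  if p.2.2 = "urgente" then 0 else if p.2.1 ≥ 60 then 1 else 2
def pvChave2 (p : String × Int × String) : Int :=
  if p.2.2 = "urgente" then -p.2.1 else 0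
-- single stable sort with the tuple key, then project the names
def prioridade_paciente_alt (lista_pacientes : List (String × Int × String)) : List String :=
  (PySem.List.sorted2 lista_pacientes pvChave1 pvChave2 false).map (fun p => p.1)

-- ===== PRECONDITION & SPEC =====
def Spec_prioridade_paciente (lista_pacientes : List (String × Int × String)) (out : List String) : Prop := out = prioridade_paciente_alt lista_pacientes
instance (lista_pacientes : List (String × Int × String)) (out : List String) : Decidable (Spec_prioridade_paciente lista_pacientes out) := by unfold Spec_prioridade_paciente; infer_instance

-- ===== CLAIM (what is proved, stated in full; the proofs are below) =====
def Claim_equal_prioridade_paciente : Prop := ∀ (lista_pacientes : List (String × Int × String)), Dom_prioridade_paciente lista_pacientes → Spec_prioridade_paciente lista_pacientes (prioridade_paciente lista_pacientes)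

-- ===== LEMMAS AND PROOFS =====

-- triage predicates (proof-side only)
def pvIsU (p : String × Int × String) : Bool := decide (p.2.2 = "urgente")
def pvIsI (p : String × Int × String) : Bool := !pvIsU p && decide (p.2.1 ≥ 60)
def pvIsN (p : String × Int × String) : Bool := !pvIsU p && !decide (p.2.1 ≥ 60)

-- the comparison sorted2 uses for the tuple key (pvChave1, pvChave2)
def pvLt (a b : String × Int × String) : Bool :=
  decide (pvChave1 a < pvChave1 b) || (!decide (pvChave1 b < pvChave1 a) && decide (pvChave2 a < pvChave2 b))

theorem pv_chave1_of_isU (p : String × Int × String) (h : pvIsU p = true) : pvChave1 p = 0 := by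
  simp [pvIsU] at h; simp [pvChave1, h]

theorem pv_chave1_of_isI (p : String × Int × String) (h : pvIsI p = true) : pvChave1 p = 1 := by
  simp [pvIsU, pvIsI] at h; simp [pvChave1, h.1, h.2]

theorem pv_chave1_of_isN (p : String × Int × String) (h : pvIsN p = true) : pvChave1 p = 2 := by
  simp [pvIsU, pvIsN] at h; simp [pvChave1, h.1]; omega

theorem pv_insertBy_all_before {α : Type} (before : α → α → Bool) (x : α) (ys : List α)
    (h : ∀ y ∈ ys, before x y = true) : PySem.List.insertBy before x ys = x :: ys := by
  cases ys with
  | nil => rfl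
  | cons y ys => simp [PySem.List.insertBy, h y (by simp)]

theorem pv_insertBy_append_left {α : Type} (before : α → α → Bool) (x : α) (l1 l2 : List α)
    (h : ∀ y ∈ l1, before x y = false) :
    PySem.List.insertBy before x (l1 ++ l2) = l1 ++ PySem.List.insertBy before x l2 := by
  induction l1 with
  | nil => simp
  | cons y l1 ih =>
    simp only [List.cons_append, PySem.List.insertBy, h y (by simp)]
    simp [ih (fun z hz => h z (by simp [hz]))]

theorem pv_insertBy_append_right {α : Type} (before : α → α → Bool) (x : α) (l1 l2 : List α)
    (h : ∀ y ∈ l2, before x y = true) :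
    PySem.List.insertBy before x (l1 ++ l2) = PySem.List.insertBy before x l1 ++ l2 := by
  induction l1 with
  | nil => simp [PySem.List.insertBy, pv_insertBy_all_before before x l2 h]
  | cons y l1 ih =>
    by_cases hb : before x y = true
    · simp [PySem.List.insertBy, hb]
    · simp only [List.cons_append, PySem.List.insertBy, eq_false_of_ne_true hb]
      simp [ih]

theorem pv_insertBy_congr {α : Type} (b1 b2 : α → α → Bool) (x : α) (ys : List α)
    (h : ∀ y ∈ ys, b1 x y = b2 x y) :
    PySem.List.insertBy b1 x ys = PySem.List.insertBy b2 x ys := by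
  induction ys with
  | nil => rfl
  | cons y ys ih =>
    simp only [PySem.List.insertBy, h y (by simp)]
    rw [ih (fun z hz => h z (by simp [hz]))]

-- the triage loop of A is the three filters
theorem pv_triage (xs : List (String × Int × String))
    (u i n : List (String × Int × String)) :
    xs.foldl
      (fun (acc : List (String × Int × String) × List (String × Int × String) × List (String × Int × String)) paciente =>
        if paciente.2.2 = "urgente" then (acc.1 ++ [paciente], acc.2.1, acc.2.2)
        else if paciente.2.1 ≥ 60 then (acc.1, acc.2.1 ++ [paciente], acc.2.2)
        else (acc.1, acc.2.1, acc.2.2 ++ [paciente])) (u, i, n)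
      = (u ++ xs.filter pvIsU, i ++ xs.filter pvIsI, n ++ xs.filter pvIsN) := by
  induction xs generalizing u i n with
  | nil => simp
  | cons p xs ih =>
    by_cases hu : p.2.2 = "urgente"
    · simp [hu, ih, pvIsU, pvIsI, pvIsN]
    · by_cases hi : p.2.1 ≥ 60
      · simp [hu, hi, ih, pvIsU, pvIsI, pvIsN]
      · simp [hu, hi, ih, pvIsU, pvIsI, pvIsN]

-- B's single stable sort splits into A's three groups
theorem pv_sorted2_split (xs : List (String × Int × String)) :
    PySem.List.sorted2 xs pvChave1 pvChave2 false =
      PySem.List.sorted (xs.filter pvIsU) (fun p => p.2.1) true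
        ++ xs.filter pvIsI ++ xs.filter pvIsN := by
  induction xs using List.reverseRecOn with
  | nil => rfl
  | append_singleton xs x ih =>
    have hstep : PySem.List.sorted2 (xs ++ [x]) pvChave1 pvChave2 false
        = PySem.List.insertBy pvLt x (PySem.List.sorted2 xs pvChave1 pvChave2 false) := by
      simp [PySem.List.sorted2, List.foldl_append]
      rfl
    rw [hstep, ih]
    have hUmem : ∀ y ∈ PySem.List.sorted (xs.filter pvIsU) (fun p => p.2.1) true, pvIsU y = true := by
      intro y hy
      have := (PySem.List.mem_sorted _ _ _ _).mp hy
      exact (List.mem_filter.mp this).2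
    have hImem : ∀ y ∈ xs.filter pvIsI, pvIsI y = true := fun y hy => (List.mem_filter.mp hy).2
    have hNmem : ∀ y ∈ xs.filter pvIsN, pvIsN y = true := fun y hy => (List.mem_filter.mp hy).2
    by_cases hu : x.2.2 = "urgente"
    · -- urgent: insert into the urgent segment
      have hk1 : pvChave1 x = 0 := by simp [pvChave1, hu]
      rw [List.append_assoc, pv_insertBy_append_right pvLt x _ _ (by
        intro y hy
        rcases List.mem_append.mp hy with hy | hy
        · have h1 := pv_chave1_of_isI y (hImem y hy)
          simp [pvLt, hk1, h1]
        · have h1 := pv_chave1_of_isN y (hNmem y hy)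
          simp [pvLt, hk1, h1])]
      rw [pv_insertBy_congr pvLt (fun a b => decide (b.2.1 < a.2.1)) x _ (by
        intro y hy
        have h1 := pv_chave1_of_isU y (hUmem y hy)
        have h2 : pvChave2 y = -y.2.1 := by
          have := hUmem y hy; simp [pvIsU] at this; simp [pvChave2, this]
        have h3 : pvChave2 x = -x.2.1 := by simp [pvChave2, hu]
        simp [pvLt, hk1, h1, h2, h3])]
      have hsortstep : PySem.List.sorted ((xs ++ [x]).filter pvIsU) (fun p => p.2.1) true
          = PySem.List.insertBy (fun a b => decide (b.2.1 < a.2.1)) x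
              (PySem.List.sorted (xs.filter pvIsU) (fun p => p.2.1) true) := by
        have hfx : (xs ++ [x]).filter pvIsU = xs.filter pvIsU ++ [x] := by
          simp [List.filter_append, pvIsU, hu]
        rw [hfx, PySem.List.sorted_rev_eq_foldl_insertBy, List.foldl_append,
          ← PySem.List.sorted_rev_eq_foldl_insertBy]
        simp
      rw [hsortstep]
      have hfI : (xs ++ [x]).filter pvIsI = xs.filter pvIsI := by
        simp [List.filter_append, pvIsI, pvIsU, hu]
      have hfN : (xs ++ [x]).filter pvIsN = xs.filter pvIsN := by
        simp [List.filter_append, pvIsN, pvIsU, hu]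
      rw [hfI, hfN, List.append_assoc]
    · by_cases hi : x.2.1 ≥ 60
      · -- idoso: goes to the end of the middle segment
        have hk1 : pvChave1 x = 1 := by simp [pvChave1, hu, hi]
        rw [pv_insertBy_append_left pvLt x _ _ (by
          intro y hy
          rcases List.mem_append.mp hy with hy | hy
          · have h1 := pv_chave1_of_isU y (hUmem y hy)
            simp [pvLt, hk1, h1]
          · have h1 := pv_chave1_of_isI y (hImem y hy)
            have h2 : pvChave2 y = 0 := by
              have := hImem y hy; simp [pvIsI, pvIsU] at this; simp [pvChave2, this.1]
            have h3 : pvChave2 x = 0 := by simp [pvChave2, hu]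
            simp [pvLt, hk1, h1, h2, h3])]
        rw [pv_insertBy_all_before pvLt x _ (by
          intro y hy
          have h1 := pv_chave1_of_isN y (hNmem y hy)
          simp [pvLt, hk1, h1])]
        have hfU : (xs ++ [x]).filter pvIsU = xs.filter pvIsU := by
          simp [List.filter_append, pvIsU, hu]
        have hfI : (xs ++ [x]).filter pvIsI = xs.filter pvIsI ++ [x] := by
          simp [List.filter_append, pvIsI, pvIsU, hu, hi]
        have hfN : (xs ++ [x]).filter pvIsN = xs.filter pvIsN := by
          simp [List.filter_append, pvIsN, pvIsU, hu, hi]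
        rw [hfU, hfI, hfN]
        simp
      · -- normal: goes to the very end
        have hk1 : pvChave1 x = 2 := by simp [pvChave1, hu, hi]
        rw [PySem.List.insertBy_of_forall_not_before pvLt x _ (by
          intro y hy
          rcases List.mem_append.mp hy with hy | hy
          rcases List.mem_append.mp hy with hy2 | hy2
          · have h1 := pv_chave1_of_isU y (hUmem y hy2)
            simp [pvLt, hk1, h1]
          · have h1 := pv_chave1_of_isI y (hImem y hy2)
            simp [pvLt, hk1, h1]
          · have h1 := pv_chave1_of_isN y (hNmem y hy)
            have h2 : pvChave2 y = 0 := by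
              have := hNmem y hy; simp [pvIsN, pvIsU] at this; simp [pvChave2, this.1]
            have h3 : pvChave2 x = 0 := by simp [pvChave2, hu]
            simp [pvLt, hk1, h1, h2, h3])]
        have hfU : (xs ++ [x]).filter pvIsU = xs.filter pvIsU := by
          simp [List.filter_append, pvIsU, hu]
        have hfI : (xs ++ [x]).filter pvIsI = xs.filter pvIsI := by
          simp [List.filter_append, pvIsI, pvIsU, hu, hi]
        have hfN : (xs ++ [x]).filter pvIsN = xs.filter pvIsN ++ [x] := by
          simp [List.filter_append, pvIsN, pvIsU, hu, hi]
        rw [hfU, hfI, hfN]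
        simp

-- ===== VERDICT (by name: the statement is the Claim_ definition above) =====
theorem prioridade_paciente_spec : Claim_equal_prioridade_paciente := by
  intro xs _
  unfold Spec_prioridade_paciente prioridade_paciente prioridade_paciente_alt
  rw [pv_sorted2_split, pv_triage xs [] [] []]
  simp
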